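-- pv_equiv track=rewrite | github.com/flowersteam/ce_llms | visualize.py | parse_colors_dict
-- ===== SOURCE A (Python) =====
-- def parse_colors_dict(colors_dict, legend_conf):
--
--     if legend_conf == "qd":
--         for d, c in colors_dict.items():
--             if "Q20" in d:
--                 colors_dict[d] = "tab:red"
--             elif "Q40" in d:
--                 colors_dict[d] = "tab:orange"
--             elif "Q51" in d:
--                 colors_dict[d] = "tab:purple"
--             elif "Q60" in d:
--                 colors_dict[d] = "tab:blue"
--             elif "Q80" in d:
--                 colors_dict[d] = "tab:green"
--             elif "high quality" in d:
--                 colors_dict[d] = "tab:green"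
--             elif "mid quality" in d:
--                 colors_dict[d] = "tab:blue"
--             elif "low quality" in d:
--                 colors_dict[d] = "tab:red"
--             else:
--                 colors_dict[d] = "black"
--
--     elif legend_conf == "datasets":
--         for d, c in colors_dict.items():
--             if "webis" in d:
--                 colors_dict[d] = "tab:orange"
--             elif "reddit_submissions" in d.lower():
--                 colors_dict[d] = "tab:red"
--             elif "100m_tw" in d.lower():
--                 colors_dict[d] = "tab:blue"
--             elif "senator" in d.lower():
--                 colors_dict[d] = "tab:green"
--             elif "wikipedia" in d:
--                 colors_dict[d] = "tab:gray"
--             else: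
--                 colors_dict[d] = "black"
--
--     else:
--         return colors_dict
--
--
--     return colors_dict
-- ===== SOURCE B (Python) =====
-- def parse_colors_dict(colors_dict, legend_conf):
--     # B: layered painting. Start every key at "black", then sweep the rules in
--     # REVERSE priority order, each sweep over-painting every key that contains
--     # its substring; the highest-priority rule paints last, so first-match-wins
--     # falls out of last-write-wins. Mutates colors_dict in place like A.
--     if legend_conf == "qd":
--         rules = [("Q20", False, "tab:red"), ("Q40", False, "tab:orange"),
--                  ("Q51", False, "tab:purple"), ("Q60", False, "tab:blue"),
--                  ("Q80", False, "tab:green"), ("high quality", False, "tab:green"),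
--                  ("mid quality", False, "tab:blue"), ("low quality", False, "tab:red")]
--     elif legend_conf == "datasets":
--         rules = [("webis", False, "tab:orange"), ("reddit_submissions", True, "tab:red"),
--                  ("100m_tw", True, "tab:blue"), ("senator", True, "tab:green"),
--                  ("wikipedia", False, "tab:gray")]
--     else:
--         return colors_dict
--     color = {d: "black" for d in colors_dict}
--     for sub, low, c in reversed(rules):
--         for d in color:
--             if sub in (d.lower() if low else d):
--                 color[d] = c
--     colors_dict.update(color)
--     return colors_dict
-- ===== Notes on version B (the rewrite author's own statement) =====
-- stated objective: alternative
-- what changed: A makes one pass over the keys and decides each color with a first-match if/elif chain; B interchanges the loops: it initialises every key to 'black' and then sweeps the rules in reverse priority order, over-painting all matching keys per sweep, so first-match-wins emerges from last-write-wins.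
import Mathlib
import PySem

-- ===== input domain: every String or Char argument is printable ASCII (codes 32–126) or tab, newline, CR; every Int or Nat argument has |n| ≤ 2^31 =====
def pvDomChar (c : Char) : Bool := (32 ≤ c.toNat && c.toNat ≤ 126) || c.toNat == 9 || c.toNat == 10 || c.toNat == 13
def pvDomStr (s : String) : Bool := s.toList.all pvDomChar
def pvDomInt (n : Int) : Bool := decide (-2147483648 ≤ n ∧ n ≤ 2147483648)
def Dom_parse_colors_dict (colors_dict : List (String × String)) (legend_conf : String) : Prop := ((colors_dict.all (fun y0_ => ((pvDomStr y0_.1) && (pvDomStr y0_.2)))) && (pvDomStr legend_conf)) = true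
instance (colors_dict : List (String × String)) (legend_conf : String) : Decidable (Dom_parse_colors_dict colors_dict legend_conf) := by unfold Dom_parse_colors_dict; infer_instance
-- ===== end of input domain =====

-- B replaces A's per-key first-match if/elif chain by layered painting: every key starts
-- "black" and the rules are swept in reverse priority order, over-painting matching keys.
-- Both mutate the dict in place in Python; the equivalence proved is about the return value.

-- ===== PORT A =====
-- A's qd if/elif chain
def pvQdColorA (d : String) : String :=
  if PySem.Str.isIn "Q20" d then "tab:red"
  else if PySem.Str.isIn "Q40" d then "tab:orange"
  else if PySem.Str.isIn "Q51" d then "tab:purple"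
  else if PySem.Str.isIn "Q60" d then "tab:blue"
  else if PySem.Str.isIn "Q80" d then "tab:green"
  else if PySem.Str.isIn "high quality" d then "tab:green"
  else if PySem.Str.isIn "mid quality" d then "tab:blue"
  else if PySem.Str.isIn "low quality" d then "tab:red"
  else "black"

-- A's datasets if/elif chain
def pvDsColorA (d : String) : String :=
  if PySem.Str.isIn "webis" d then "tab:orange"
  else if PySem.Str.isIn "reddit_submissions" (PySem.Str.lower d) then "tab:red"
  else if PySem.Str.isIn "100m_tw" (PySem.Str.lower d) then "tab:blue"
  else if PySem.Str.isIn "senator" (PySem.Str.lower d) then "tab:green"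
  else if PySem.Str.isIn "wikipedia" d then "tab:gray"
  else "black"

def parse_colors_dict (colors_dict : List (String × String)) (legend_conf : String) : List (String × String) :=
  if legend_conf == "qd" then
    ((PySem.Dict.mk colors_dict).items.foldl
      (fun acc (p : String × String) => acc.insert p.1 (pvQdColorA p.1))
      (PySem.Dict.mk colors_dict)).items
  else if legend_conf == "datasets" then
    ((PySem.Dict.mk colors_dict).items.foldl
      (fun acc (p : String × String) => acc.insert p.1 (pvDsColorA p.1))
      (PySem.Dict.mk colors_dict)).items
  else
    colors_dict

-- ===== PORT B =====
-- B's rule tables (substring, use_lowercase, color)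
def pvQdRules : List (String × Bool × String) :=
  [("Q20", false, "tab:red"), ("Q40", false, "tab:orange"),
   ("Q51", false, "tab:purple"), ("Q60", false, "tab:blue"),
   ("Q80", false, "tab:green"), ("high quality", false, "tab:green"),
   ("mid quality", false, "tab:blue"), ("low quality", false, "tab:red")]

def pvDsRules : List (String × Bool × String) :=
  [("webis", false, "tab:orange"), ("reddit_submissions", true, "tab:red"),
   ("100m_tw", true, "tab:blue"), ("senator", true, "tab:green"),
   ("wikipedia", false, "tab:gray")]

-- B's inner sweep: one rule over-paints every matching key of the color table
def pvSweep (acc : List (String × String)) (r : String × Bool × String) : List (String × String) :=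
  acc.map (fun p =>
    if PySem.Str.isIn r.1 (if r.2.1 then PySem.Str.lower p.1 else p.1) then (p.1, r.2.2) else p)

def parse_colors_dict_alt (colors_dict : List (String × String)) (legend_conf : String) : List (String × String) :=
  let rules? : Option (List (String × Bool × String)) :=
    if legend_conf == "qd" then some pvQdRules
    else if legend_conf == "datasets" then some pvDsRules
    else none
  match rules? with
  | none => colors_dict
  | some rules =>
    -- color = {d: "black" for d in colors_dict}
    let color0 := colors_dict.map (fun p => (p.1, "black"))
    -- for sub, low, c in reversed(rules): over-paint matching keys
    let color := rules.reverse.foldl pvSweep color0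
    -- colors_dict.update(color); return colors_dict
    (color.foldl (fun acc (p : String × String) => acc.insert p.1 p.2) (PySem.Dict.mk colors_dict)).items

-- ===== PRECONDITION & SPEC =====
def Spec_parse_colors_dict (colors_dict : List (String × String)) (legend_conf : String) (out : List (String × String)) : Prop := out = parse_colors_dict_alt colors_dict legend_conf
instance (colors_dict : List (String × String)) (legend_conf : String) (out : List (String × String)) : Decidable (Spec_parse_colors_dict colors_dict legend_conf out) := by unfold Spec_parse_colors_dict; infer_instance

-- ===== CLAIM (what is proved, stated in full; the proofs are below) =====
def Claim_equal_parse_colors_dict : Prop := ∀ (colors_dict : List (String × String)) (legend_conf : String), Dom_parse_colors_dict colors_dict legend_conf → Spec_parse_colors_dict colors_dict legend_conf (parse_colors_dict colors_dict legend_conf)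

-- ===== LEMMAS AND PROOFS =====

-- a foldl of key-preserving inserts rewrites exactly the keys occurring in the iterated list
theorem pv_foldl_insert_items (f : String → String) :
    ∀ (l : List (String × String)) (d : PySem.Dict String String),
      (∀ s, s ∈ l.map Prod.fst → d.contains s = true) →
      (l.foldl (fun acc p => acc.insert p.1 (f p.1)) d).items
        = d.items.map (fun p => if p.1 ∈ l.map Prod.fst then (p.1, f p.1) else p) := by
  intro l
  induction l with
  | nil => intro d _; simp
  | cons q t ih =>
    intro d hc
    have hq : d.contains q.1 = true := hc q.1 (by simp)
    have hstep := ih (d.insert q.1 (f q.1)) (by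
      intro s hs
      rw [PySem.Dict.contains_insert]
      simp [hc s (by simp [hs])])
    simp only [List.foldl_cons] at *
    rw [hstep, PySem.Dict.items_insert]
    simp only [hq, if_true, List.map_map]
    apply List.map_congr_left
    intro p _
    by_cases h : p.1 = q.1
    · simp [Function.comp, h]
    · have hb : (p.1 == q.1) = false := by simpa using h
      simp only [Function.comp_apply, hb, Bool.false_eq_true, if_false]
      by_cases hm : p.1 ∈ List.map Prod.fst t <;> simp [List.mem_cons, h, hm]

-- the loop interchange: sweeping the rules over a keyed color table acts pointwise per key
theorem pv_sweep_fold_map (rs : List (String × Bool × String)) :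
    ∀ (v : String → String) (l : List (String × String)),
      rs.foldl pvSweep (l.map (fun p => (p.1, v p.1)))
        = l.map (fun p => (p.1,
            rs.foldl (fun c r =>
              if PySem.Str.isIn r.1 (if r.2.1 then PySem.Str.lower p.1 else p.1) then r.2.2 else c)
              (v p.1))) := by
  induction rs with
  | nil => intro v l; simp
  | cons r t ih =>
    intro v l
    simp only [List.foldl_cons]
    have h1 : pvSweep (l.map (fun p => (p.1, v p.1))) r
        = l.map (fun p => (p.1,
            if PySem.Str.isIn r.1 (if r.2.1 then PySem.Str.lower p.1 else p.1) then r.2.2 else v p.1)) := by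
      simp only [pvSweep, List.map_map]
      apply List.map_congr_left
      intro p _
      exact (apply_ite (fun c => (p.1, c)) _ r.2.2 (v p.1)).symm
    rw [h1, ih (fun s => if PySem.Str.isIn r.1 (if r.2.1 then PySem.Str.lower s else s) then r.2.2 else v s) l]

-- B's per-key repainting result, for each concrete rule table, is A's if/elif chain
theorem pv_qd_paint (d : String) :
    pvQdRules.reverse.foldl (fun c r =>
        if PySem.Str.isIn r.1 (if r.2.1 then PySem.Str.lower d else d) then r.2.2 else c) "black"
      = pvQdColorA d := by
  simp only [pvQdRules, pvQdColorA, List.reverse_cons, List.reverse_nil, List.nil_append,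
    List.cons_append, List.foldl_cons, List.foldl_nil, Bool.false_eq_true, if_false]

theorem pv_ds_paint (d : String) :
    pvDsRules.reverse.foldl (fun c r =>
        if PySem.Str.isIn r.1 (if r.2.1 then PySem.Str.lower d else d) then r.2.2 else c) "black"
      = pvDsColorA d := by
  simp only [pvDsRules, pvDsColorA, List.reverse_cons, List.reverse_nil, List.nil_append,
    List.cons_append, List.foldl_cons, List.foldl_nil, Bool.false_eq_true, if_false, if_true]

-- with a concrete rule table, B's branch equals the recoloring map over (Dict.mk l).items
theorem pv_alt_branch (rules : List (String × Bool × String)) (f : String → String)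
    (hf : ∀ d, rules.reverse.foldl (fun c r =>
        if PySem.Str.isIn r.1 (if r.2.1 then PySem.Str.lower d else d) then r.2.2 else c) "black" = f d)
    (l : List (String × String)) :
    ((rules.reverse.foldl pvSweep (l.map (fun p => (p.1, "black")))).foldl
        (fun acc (p : String × String) => acc.insert p.1 p.2) (PySem.Dict.mk l)).items
      = (((PySem.Dict.mk l).items.foldl
          (fun (acc : PySem.Dict String String) (p : String × String) => acc.insert p.1 (f p.1))
          (PySem.Dict.mk l))).items := by
  have hcol : rules.reverse.foldl pvSweep (l.map (fun p => (p.1, "black")))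
      = l.map (fun p => (p.1, f p.1)) := by
    rw [pv_sweep_fold_map rules.reverse (fun _ => "black") l]
    exact List.map_congr_left fun p _ => by rw [hf p.1]
  rw [hcol]
  have hcontains : ∀ s, s ∈ l.map Prod.fst → (PySem.Dict.mk l).contains s = true := by
    intro s hs
    simp only [PySem.Dict.contains_mk]
    obtain ⟨p, hp, hps⟩ := List.mem_map.mp hs
    exact List.any_eq_true.mpr ⟨p, hp, by simp [hps]⟩
  -- B's update fold over the mapped list is a fold of keyed inserts over l
  have hB : (l.map (fun p => (p.1, f p.1))).foldl
      (fun acc (p : String × String) => acc.insert p.1 p.2) (PySem.Dict.mk l)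
      = l.foldl (fun acc p => acc.insert p.1 (f p.1)) (PySem.Dict.mk l) := by
    rw [List.foldl_map]
  rw [hB, pv_foldl_insert_items f l (PySem.Dict.mk l) hcontains]

-- ===== VERDICT (by name: the statement is the Claim_ definition above) =====
theorem parse_colors_dict_spec : Claim_equal_parse_colors_dict := by
  intro colors_dict legend_conf _
  unfold Spec_parse_colors_dict parse_colors_dict parse_colors_dict_alt
  by_cases hqd : legend_conf == "qd"
  · simp only [hqd, if_true]
    exact (pv_alt_branch pvQdRules pvQdColorA pv_qd_paint colors_dict).symm
  · by_cases hds : legend_conf == "datasets"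
    · simp only [hqd, hds, Bool.false_eq_true, if_false, if_true]
      exact (pv_alt_branch pvDsRules pvDsColorA pv_ds_paint colors_dict).symm
    · simp [hqd, hds]
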